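-- pv_equiv track=rewrite | github.com/ddolboghi/programmers | 프로그래머스/unrated/155652. 둘만의 암호/둘만의 암호.py | solution
-- ===== SOURCE A (Python) =====
-- def solution(s, skip, index):
--     answer = ''
--     tot = 'abcdefghijklmnopqrstuvwxyz'
--     for k in skip:
--         tot = tot.replace(k, '')
--
--     for i in range(len(s)):
--         for j in range(len(tot)):
--             if s[i] == tot[j]:
--                 num = (j+index) % len(tot) if (j+index) >= len(tot) else j+index
--                 answer += tot[num]
--     return answer
-- ===== SOURCE B (Python) =====
-- def solution(s, skip, index):
--     skipset = set(skip)
--     n = sum(1 for ch in 'abcdefghijklmnopqrstuvwxyz' if ch not in skipset)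
--     if n == 0:
--         return ''
--     k = index % n
--
--     def nxt(c):
--         while True:
--             c = chr((ord(c) - 97 + 1) % 26 + 97)
--             if c not in skipset:
--                 return c
--
--     out = []
--     for c in s:
--         if 'a' <= c <= 'z' and c not in skipset:
--             for _ in range(k):
--                 c = nxt(c)
--             out.append(c)
--     return ''.join(out)
-- ===== Notes on version B (the rewrite author's own statement) =====
-- stated objective: alternative
-- what changed: B never indexes the reduced alphabet at decode time: it computes k = index % n once and decodes each kept character by walking k successor steps around the 26-letter cycle skipping the letters of skip (set membership), instead of A's inner positional scan of the reduced string plus per-occurrence shift/wrap arithmetic.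
-- crash fix: A raises IndexError when some character of s sits at position j of the reduced alphabet with j+index < -len(tot) (a large negative index); B returns the modular shift there (e.g. solution('a','',-27) = 'z'). — e.g. on solution("a", "", -27): A raises IndexError, B returns "z"
import Mathlib
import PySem

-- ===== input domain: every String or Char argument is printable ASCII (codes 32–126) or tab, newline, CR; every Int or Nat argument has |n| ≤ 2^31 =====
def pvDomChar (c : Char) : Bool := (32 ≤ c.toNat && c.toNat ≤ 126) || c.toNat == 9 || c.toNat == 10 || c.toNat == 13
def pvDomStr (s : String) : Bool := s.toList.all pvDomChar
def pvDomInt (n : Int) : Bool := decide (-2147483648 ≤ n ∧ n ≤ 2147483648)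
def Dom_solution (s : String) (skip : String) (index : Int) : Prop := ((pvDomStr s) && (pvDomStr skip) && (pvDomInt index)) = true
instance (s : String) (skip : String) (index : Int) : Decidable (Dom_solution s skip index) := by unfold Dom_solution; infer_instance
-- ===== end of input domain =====

-- B decodes by a different algorithm: it computes k = index % n once and walks each kept character
-- k successor steps around the 26-letter cycle (skipping the letters of skip), instead of A's inner
-- positional scan of the reduced alphabet with per-occurrence shift arithmetic.

-- ===== PORT A =====
-- A builds tot = 'abcdefghijklmnopqrstuvwxyz' with each skip letter removed (str.replace)
def pvTot (skip : String) : List Char :=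
  skip.toList.foldl (fun tot k => PySem.Chars.replace tot [k] []) "abcdefghijklmnopqrstuvwxyz".toList

def solution (s : String) (skip : String) (index : Int) : String :=
  let tot := pvTot skip
  let ans : List Char :=
    (PySem.List.pyRange 0 (PySem.List.len s.toList)).foldl (fun ans i =>
      (PySem.List.pyRange 0 (PySem.List.len tot)).foldl (fun ans j =>
        if PySem.List.pyGetD s.toList i ' ' = PySem.List.pyGetD tot j ' ' then
          let num : Int :=
            if PySem.List.len tot ≤ j + index then PySem.Int.mod (j + index) (PySem.List.len tot)
            else j + index
          -- Python's tot[num] raises IndexError exactly where pyGet? is none (excluded by Pre_)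
          match PySem.List.pyGet? tot num with
          | some c => ans ++ [c]
          | none => ans
        else ans) ans) []
  String.ofList ans

-- ===== PORT B =====
-- Source B's nxt: advance to the next letter of the 26-cycle not in skip; Python's 'while True' loop
-- terminates within 26 steps whenever some lowercase letter is outside skip (guaranteed by the
-- n ≠ 0 guard at the call site), so fuel 26 is exact there.
def pvNxt (skipset : PySem.Set Char) : Nat → Char → Char
  | 0, c => c
  | fuel+1, c =>
    let c' := Char.ofNat ((c.toNat - 97 + 1) % 26 + 97)
    if skipset.contains c' then pvNxt skipset fuel c' else c'

def solution_alt (s : String) (skip : String) (index : Int) : String :=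
  let skipset : PySem.Set Char := PySem.Set.ofList skip.toList
  let n : Int := ("abcdefghijklmnopqrstuvwxyz".toList.countP (fun ch => !(skipset.contains ch)) : Nat)
  if n = 0 then "" else
    let k : Int := PySem.Int.mod index n   -- k = index % n ≥ 0, so range(k) has k.toNat steps
    String.ofList (s.toList.foldl (fun out c =>
      if 'a' ≤ c ∧ c ≤ 'z' ∧ (skipset.contains c) = false then
        out ++ [(List.range k.toNat).foldl (fun c _ => pvNxt skipset 26 c) c]
      else out) [])

-- ===== PRECONDITION & SPEC =====
-- Pre_ excludes exactly the inputs where A raises IndexError: some character of s occurring at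
-- position j of the reduced alphabet with j + index < -len(tot) (tot[j+index] out of range).
def Pre_solution (s : String) (skip : String) (index : Int) : Prop :=
  (s.toList.all fun c => !((pvTot skip).contains c) ||
    decide (-((pvTot skip).length : Int) ≤ ((pvTot skip).idxOf c : Int) + index)) = true
instance (s : String) (skip : String) (index : Int) : Decidable (Pre_solution s skip index) := by
  unfold Pre_solution; infer_instance
def pvWitness_solution : String × String × Int := ("ab", "b", 5)

-- A raises IndexError when some character of s sits at position j of the reduced alphabet with
-- j + index < -len(tot); B returns the modular shift there.
def Raises_solution (s : String) (skip : String) (index : Int) : Prop :=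
  (s.toList.any fun c => (pvTot skip).contains c &&
    decide (((pvTot skip).idxOf c : Int) + index < -((pvTot skip).length : Int))) = true
instance (s : String) (skip : String) (index : Int) : Decidable (Raises_solution s skip index) := by
  unfold Raises_solution; infer_instance
def pvRaiseWitness_solution : String × String × Int := ("a", "", -27)
def pvRaiseWitnessOut_solution : String := "z"

def Spec_solution (s : String) (skip : String) (index : Int) (out : String) : Prop :=
  out = solution_alt s skip index
instance (s : String) (skip : String) (index : Int) (out : String) : Decidable (Spec_solution s skip index out) := by
  unfold Spec_solution; infer_instance

-- ===== CLAIM (what is proved, stated in full; the proofs are below) =====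
def Claim_equal_solution : Prop := ∀ (s : String) (skip : String) (index : Int),
  Dom_solution s skip index → Pre_solution s skip index →
  Spec_solution s skip index (solution s skip index)
def Claim_raises_solution : Prop :=
  (∀ (s : String) (skip : String) (index : Int), Dom_solution s skip index →
    Raises_solution s skip index → ¬ Pre_solution s skip index) ∧
  (Dom_solution (pvRaiseWitness_solution.1) (pvRaiseWitness_solution.2.1) (pvRaiseWitness_solution.2.2) ∧
   Raises_solution (pvRaiseWitness_solution.1) (pvRaiseWitness_solution.2.1) (pvRaiseWitness_solution.2.2) ∧
   solution_alt (pvRaiseWitness_solution.1) (pvRaiseWitness_solution.2.1) (pvRaiseWitness_solution.2.2) = pvRaiseWitnessOut_solution)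

-- ===== LEMMAS AND PROOFS =====

-- the letter with cycle position i (i < 26): 'a' + i
def pvCOf (i : Nat) : Char := Char.ofNat (97 + i)
-- "letter at position i is kept" (not a skip letter)
def pvQ (skip : String) (i : Nat) : Bool := !(skip.toList.contains (pvCOf i))
-- the kept positions, in increasing order
def pvR (skip : String) : List Nat := (List.range 26).filter (pvQ skip)

theorem pv_replace_go_single (k : Char) (l : List Char) (fuel : Nat) (acc : List Char)
    (h : l.length ≤ fuel) :
    PySem.Chars.replace.go [k] [] fuel l acc = acc.reverse ++ l.filter (fun c => !(c == k)) := by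
  induction l generalizing fuel acc with
  | nil => cases fuel <;> simp [PySem.Chars.replace.go]
  | cons c t ih =>
    cases fuel with
    | zero => simp at h
    | succ m =>
      simp only [PySem.Chars.replace.go, List.isPrefixOf]
      by_cases hk : k = c
      · subst hk
        simp only [BEq.refl, Bool.true_and, if_true, List.length_cons, List.length_nil,
          List.drop_succ_cons, List.drop_zero, List.reverse_nil, List.nil_append]
        rw [ih m acc (by simpa using Nat.le_of_succ_le_succ h)]
        simp
      · have hne : (k == c) = false := by simp [hk]
        simp only [hne, Bool.false_and]
        rw [ih m (c :: acc) (by simpa using Nat.le_of_succ_le_succ h)]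
        have hcK : (c == k) = false := by simp [Ne.symm hk]
        simp [hcK]

theorem pv_replace_single (t : List Char) (k : Char) :
    PySem.Chars.replace t [k] [] = t.filter (fun c => !(c == k)) := by
  rw [PySem.Chars.replace, if_neg (by simp)]
  simpa using pv_replace_go_single k t t.length [] le_rfl

theorem pv_fold_replace (ks : List Char) (t : List Char) :
    ks.foldl (fun tot k => PySem.Chars.replace tot [k] []) t
      = t.filter (fun c => !(ks.contains c)) := by
  induction ks generalizing t with
  | nil => simp
  | cons k ks ih =>
    simp only [List.foldl_cons]
    rw [pv_replace_single, ih, List.filter_filter]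
    refine List.filter_congr ?_
    intro c _
    by_cases h1 : c = k <;> simp [h1]

theorem pv_letters_eq :
    "abcdefghijklmnopqrstuvwxyz".toList = (List.range 26).map pvCOf := by decide

theorem pv_tot_eq (skip : String) : pvTot skip = (pvR skip).map pvCOf := by
  unfold pvTot pvR
  rw [pv_fold_replace, pv_letters_eq, List.filter_map]
  rfl

theorem pv_toNat_cOf (i : Nat) (h : i < 26) : (pvCOf i).toNat = 97 + i := by
  unfold pvCOf; interval_cases i <;> decide

theorem pv_nodup_pvTot (skip : String) : (pvTot skip).Nodup := by
  rw [pv_tot_eq]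
  refine (List.Nodup.filter _ List.nodup_range).map_on ?_
  intro i hi j hj hij
  rw [List.mem_filter, List.mem_range] at hi hj
  have h1 := pv_toNat_cOf i hi.1
  have h2 := pv_toNat_cOf j hj.1
  have h3 : (pvCOf i).toNat = (pvCOf j).toNat := by rw [hij]
  omega

theorem pv_set_contains (l : List Char) (x : Char) :
    (PySem.Set.ofList l).contains x = l.contains x := by
  by_cases h : x ∈ l
  · simp [PySem.Set.contains, (PySem.Set.mem_ofList l x).mpr h, h]
  · have h2 : x ∉ PySem.Set.ofList l := fun hh => h ((PySem.Set.mem_ofList l x).mp hh)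
    simp [PySem.Set.contains, h, h2]

theorem pv_nxt_gap (skip : String) (fuel i d : Nat) (hi : i < 26) (hd0 : 0 < d)
    (hdf : d ≤ fuel)
    (hmid : ∀ t, 0 < t → t < d → pvQ skip ((i + t) % 26) = false)
    (hhit : pvQ skip ((i + d) % 26) = true) :
    pvNxt (PySem.Set.ofList skip.toList) fuel (pvCOf i) = pvCOf ((i + d) % 26) := by
  induction fuel generalizing i d with
  | zero => omega
  | succ m ih =>
    have hstep : pvNxt (PySem.Set.ofList skip.toList) (m+1) (pvCOf i)
        = (if (PySem.Set.ofList skip.toList).contains (pvCOf ((i + 1) % 26)) then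
            pvNxt (PySem.Set.ofList skip.toList) m (pvCOf ((i + 1) % 26))
          else pvCOf ((i + 1) % 26)) := by
      have h1 : ((pvCOf i).toNat - 97 + 1) % 26 + 97 = 97 + (i + 1) % 26 := by
        rw [pv_toNat_cOf i hi]; omega
      show (let c' := Char.ofNat (((pvCOf i).toNat - 97 + 1) % 26 + 97);
            if (PySem.Set.ofList skip.toList).contains c' then
              pvNxt (PySem.Set.ofList skip.toList) m c' else c') = _
      simp only [pvCOf] at h1 ⊢
      rw [h1]
    have hcont : (PySem.Set.ofList skip.toList).contains (pvCOf ((i + 1) % 26))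
        = !(pvQ skip ((i + 1) % 26)) := by
      rw [pv_set_contains]; unfold pvQ; rw [Bool.not_not]
    rw [hstep, hcont]
    by_cases hd1 : d = 1
    · subst hd1
      rw [hhit]
      simp
    · have h1f : pvQ skip ((i + 1) % 26) = false := hmid 1 (by omega) (by omega)
      rw [h1f]
      simp only [Bool.not_false, if_true]
      have := ih ((i + 1) % 26) (d - 1) (Nat.mod_lt _ (by omega)) (by omega) (by omega)
        (fun t ht0 htd => by
          have := hmid (1 + t) (by omega) (by omega)
          have he : ((i + 1) % 26 + t) % 26 = (i + (1 + t)) % 26 := by omega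
          rw [he]; exact this)
        (by
          have he : ((i + 1) % 26 + (d - 1)) % 26 = (i + d) % 26 := by omega
          rw [he]; exact hhit)
      rw [this]
      have he : ((i + 1) % 26 + (d - 1)) % 26 = (i + d) % 26 := by omega
      rw [he]

theorem pv_mem_R (skip : String) (x : Nat) :
    x ∈ pvR skip ↔ x < 26 ∧ pvQ skip x = true := by
  unfold pvR
  simp [List.mem_filter, List.mem_range]

theorem pv_R_lt (skip : String) {i j : Nat} (hj : j < (pvR skip).length) (hij : i < j) :
    (pvR skip)[i]'(by omega) < (pvR skip)[j] := by
  have hp : (pvR skip).Pairwise (· < ·) := List.Pairwise.filter _ List.pairwise_lt_range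
  exact List.pairwise_iff_getElem.mp hp i j (by omega) hj hij

theorem pv_R_le (skip : String) {i j : Nat} (hj : j < (pvR skip).length) (hij : i ≤ j) :
    (pvR skip)[i]'(by omega) ≤ (pvR skip)[j] := by
  rcases Nat.lt_or_ge i j with h | h
  · exact Nat.le_of_lt (pv_R_lt skip hj h)
  · have : i = j := by omega
    subst this; exact le_rfl

theorem pv_R_elem_mem (skip : String) {j : Nat} (hj : j < (pvR skip).length) :
    (pvR skip)[j] < 26 ∧ pvQ skip ((pvR skip)[j]) = true :=
  (pv_mem_R skip _).mp (List.getElem_mem hj)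

theorem pv_step (skip : String) (j : Nat) (hj : j < (pvR skip).length) :
    pvNxt (PySem.Set.ofList skip.toList) 26 (pvCOf ((pvR skip)[j])) =
      pvCOf ((pvR skip)[(j+1) % (pvR skip).length]'(Nat.mod_lt _ (by omega))) := by
  obtain ⟨hRj26, hqRj⟩ := pv_R_elem_mem skip hj
  by_cases hlast : j + 1 < (pvR skip).length
  · obtain ⟨hRj126, _⟩ := pv_R_elem_mem skip hlast
    have hlt : (pvR skip)[j] < (pvR skip)[j+1] := pv_R_lt skip hlast (by omega)
    have hidx : (j+1) % (pvR skip).length = j+1 := Nat.mod_eq_of_lt hlast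
    have hgoal := pv_nxt_gap skip 26 ((pvR skip)[j]) ((pvR skip)[j+1] - (pvR skip)[j])
      hRj26 (by omega) (by omega)
      (fun t ht0 htd => by
        by_contra hq
        have hq' : pvQ skip (((pvR skip)[j] + t) % 26) = true := by
          cases h : pvQ skip (((pvR skip)[j] + t) % 26) with
          | false => exact absurd h hq
          | true => rfl
        have hx : ((pvR skip)[j] + t) % 26 = (pvR skip)[j] + t := by omega
        rw [hx] at hq'
        have hmem : (pvR skip)[j] + t ∈ pvR skip := (pv_mem_R skip _).mpr ⟨by omega, hq'⟩
        obtain ⟨i, hi, hxi⟩ := List.mem_iff_getElem.mp hmem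
        rcases Nat.lt_or_ge i (j+1) with hij | hij
        · have := pv_R_le skip hj (by omega : i ≤ j)
          omega
        · have := pv_R_le skip hi (by omega : j + 1 ≤ i)
          omega)
      (by
        have hx : ((pvR skip)[j] + ((pvR skip)[j+1] - (pvR skip)[j])) % 26 = (pvR skip)[j+1] := by
          omega
        rw [hx]
        exact (pv_R_elem_mem skip hlast).2)
    rw [hgoal]
    have hx : ((pvR skip)[j] + ((pvR skip)[j+1] - (pvR skip)[j])) % 26 = (pvR skip)[j+1] := by
      omega
    simp only [hx, hidx]
  · have hlen : j + 1 = (pvR skip).length := by omega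
    have h0 : 0 < (pvR skip).length := by omega
    obtain ⟨hR026, hqR0⟩ := pv_R_elem_mem skip h0
    have hR0le : (pvR skip)[0] ≤ (pvR skip)[j] := pv_R_le skip hj (by omega)
    have hidx : (j+1) % (pvR skip).length = 0 := by rw [hlen]; exact Nat.mod_self _
    have hgoal := pv_nxt_gap skip 26 ((pvR skip)[j]) (26 - (pvR skip)[j] + (pvR skip)[0])
      hRj26 (by omega) (by omega)
      (fun t ht0 htd => by
        by_contra hq
        have hq' : pvQ skip (((pvR skip)[j] + t) % 26) = true := by
          cases h : pvQ skip (((pvR skip)[j] + t) % 26) with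
          | false => exact absurd h hq
          | true => rfl
        have hmem : ((pvR skip)[j] + t) % 26 ∈ pvR skip :=
          (pv_mem_R skip _).mpr ⟨by omega, hq'⟩
        obtain ⟨i, hi, hxi⟩ := List.mem_iff_getElem.mp hmem
        have h1 := pv_R_le skip hj (by omega : i ≤ j)
        have h2 := pv_R_le skip hi (by omega : 0 ≤ i)
        omega)
      (by
        have hx : ((pvR skip)[j] + (26 - (pvR skip)[j] + (pvR skip)[0])) % 26 = (pvR skip)[0] := by
          omega
        rw [hx]; exact hqR0)
    rw [hgoal]
    have hx : ((pvR skip)[j] + (26 - (pvR skip)[j] + (pvR skip)[0])) % 26 = (pvR skip)[0] := by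
      omega
    simp only [hx, hidx]

theorem pv_iter (skip : String) (t j : Nat) (hj : j < (pvR skip).length) :
    (List.range t).foldl (fun c _ => pvNxt (PySem.Set.ofList skip.toList) 26 c)
        (pvCOf ((pvR skip)[j])) =
      pvCOf ((pvR skip)[(j+t) % (pvR skip).length]'(Nat.mod_lt _ (by omega))) := by
  induction t with
  | zero => simp [Nat.mod_eq_of_lt hj]
  | succ m ih =>
    rw [List.range_succ, List.foldl_append, ih, List.foldl_cons, List.foldl_nil]
    rw [pv_step skip _ (Nat.mod_lt _ (by omega))]
    have he : ((j+m) % (pvR skip).length + 1) % (pvR skip).length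
        = (j + (m+1)) % (pvR skip).length := by
      rw [Nat.mod_add_mod, Nat.add_assoc]
    simp only [he]

theorem pv_char_le_iff (c : Char) : ('a' ≤ c ∧ c ≤ 'z') ↔ (97 ≤ c.toNat ∧ c.toNat ≤ 122) := by
  rw [Char.le_def, Char.le_def, UInt32.le_iff_toNat_le, UInt32.le_iff_toNat_le]
  constructor <;> intro h <;> exact h

theorem pv_guard (skip : String) (c : Char) :
    ('a' ≤ c ∧ c ≤ 'z' ∧ ((PySem.Set.ofList skip.toList).contains c) = false)
      ↔ c ∈ pvTot skip := by
  rw [pv_tot_eq]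
  constructor
  · rintro ⟨h1, h2, h3⟩
    obtain ⟨hb1, hb2⟩ := (pv_char_le_iff c).mp ⟨h1, h2⟩
    refine List.mem_map.mpr ⟨c.toNat - 97, ?_, ?_⟩
    · refine (pv_mem_R skip _).mpr ⟨by omega, ?_⟩
      have hc : pvCOf (c.toNat - 97) = c := by
        unfold pvCOf
        rw [show 97 + (c.toNat - 97) = c.toNat by omega]
        exact Char.ofNat_toNat c
      rw [pvQ, hc]
      rw [pv_set_contains] at h3
      rw [h3]
      rfl
    · unfold pvCOf
      rw [show 97 + (c.toNat - 97) = c.toNat by omega]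
      exact Char.ofNat_toNat c
  · intro hm
    obtain ⟨i, hiR, hic⟩ := List.mem_map.mp hm
    obtain ⟨hi26, hqi⟩ := (pv_mem_R skip _).mp hiR
    subst hic
    refine ⟨?_, ?_, ?_⟩
    · have := pv_toNat_cOf i hi26
      exact (pv_char_le_iff _).mpr ⟨by omega, by omega⟩ |>.1
    · have := pv_toNat_cOf i hi26
      exact ((pv_char_le_iff _).mpr ⟨by omega, by omega⟩).2
    · rw [pv_set_contains]
      rw [pvQ] at hqi
      cases h : skip.toList.contains (pvCOf i) with
      | false => rfl
      | true => rw [h] at hqi; simp at hqi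

theorem pv_count_eq (skip : String) :
    ("abcdefghijklmnopqrstuvwxyz".toList.countP
        (fun ch => !((PySem.Set.ofList skip.toList).contains ch)))
      = (pvTot skip).length := by
  unfold pvTot
  rw [pv_fold_replace, List.countP_eq_length_filter]
  congr 1
  refine List.filter_congr ?_
  intro c _
  rw [pv_set_contains]

theorem pv_foldl_skip {β γ : Type} (l : List β) (p : β → Prop) [DecidablePred p]
    (f : γ → β → γ) (a : γ) (h : ∀ b ∈ l, ¬ p b) :
    l.foldl (fun acc b => if p b then f acc b else acc) a = a := by
  induction l generalizing a with
  | nil => rfl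
  | cons x xs ih =>
    simp only [List.foldl_cons, if_neg (h x (by simp))]
    exact ih a (fun b hb => h b (by simp [hb]))

theorem pv_get_shift (tot : List Char) (m : Int) (hn : 0 < tot.length)
    (hlow : -(tot.length : Int) ≤ m) :
    PySem.List.pyGet? tot
      (if (tot.length : Int) ≤ m then PySem.Int.mod m (tot.length : Int) else m)
    = some (PySem.List.pyGetD tot (PySem.Int.mod m (tot.length : Int)) ' ') := by
  have hnz : (tot.length : Int) ≠ 0 := by omega
  have hmod : PySem.Int.mod m (tot.length : Int) = m % (tot.length : Int) :=
    PySem.Int.mod_eq_emod_of_pos (by omega)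
  have h0 : 0 ≤ m % (tot.length : Int) := Int.emod_nonneg m hnz
  have h1 : m % (tot.length : Int) < (tot.length : Int) := Int.emod_lt_of_pos m (by omega)
  have hD : PySem.List.pyGetD tot (m % (tot.length : Int)) ' '
      = tot[(m % (tot.length : Int)).toNat]'(by omega) :=
    PySem.List.pyGetD_eq_getElem tot ' ' h0 h1
  rw [hmod]
  split_ifs with hge
  · rw [PySem.List.pyGet?_eq_some_getElem tot h0 h1, hD]
  · by_cases hm : 0 ≤ m
    · have heq : m % (tot.length : Int) = m := Int.emod_eq_of_lt hm (by omega)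
      rw [PySem.List.pyGet?_eq_some_getElem tot hm (by omega), hD]
      simp [heq]
    · -- negative index: Python wraps by adding the length
      have hval : m % (tot.length : Int) = m + tot.length := by
        have h2 := Int.add_mul_emod_self_left m (tot.length : Int) 1
        rw [mul_one] at h2
        rw [← h2]
        exact Int.emod_eq_of_lt (by omega) (by omega)
      simp only [PySem.List.pyGet?, PySem.List.pyIdx?, if_neg hm, if_pos hlow]
      show tot[tot.length - (-m).toNat]? = _
      rw [hD]
      have hidx : tot.length - (-m).toNat = (m % (tot.length : Int)).toNat := by omega
      rw [hidx, List.getElem?_eq_getElem (by omega)]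

-- A's inner scan over the reduced alphabet, characterised per input character
theorem pv_innerA (skip : String) (index : Int) (c : Char)
    (hpre : c ∈ pvTot skip → -(((pvTot skip).length : Int)) ≤ (((pvTot skip).idxOf c : Int)) + index)
    (ans : List Char) :
    (PySem.List.pyRange 0 (PySem.List.len (pvTot skip))).foldl (fun acc j =>
        if c = PySem.List.pyGetD (pvTot skip) j ' ' then
          (match PySem.List.pyGet? (pvTot skip)
              (if PySem.List.len (pvTot skip) ≤ j + index then
                PySem.Int.mod (j + index) (PySem.List.len (pvTot skip)) else j + index) with
           | some ch => acc ++ [ch]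
           | none => acc)
        else acc) ans
    = (if c ∈ pvTot skip then
        ans ++ [PySem.List.pyGetD (pvTot skip)
          (PySem.Int.mod (((pvTot skip).idxOf c : Int) + index) (((pvTot skip).length : Int))) ' ']
       else ans) := by
  have hnd : (pvTot skip).Nodup := pv_nodup_pvTot skip
  set tot := pvTot skip with htot
  by_cases hc : c ∈ tot
  · have hlt : tot.idxOf c < tot.length := List.idxOf_lt_length_of_mem hc
    have hkey : tot[tot.idxOf c]'hlt = c := List.getElem_idxOf hlt
    have hskip : ∀ j ∈ PySem.List.pyRange 0 (PySem.List.len tot),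
        j ≠ (tot.idxOf c : Int) → ¬ (c = PySem.List.pyGetD tot j ' ') := by
      intro j hj hne heq
      rw [PySem.List.mem_pyRange_one] at hj
      simp only [PySem.List.len_eq] at hj
      rw [PySem.List.pyGetD_eq_getElem tot ' ' hj.1 hj.2] at heq
      have : j.toNat = tot.idxOf c := (hnd.getElem_inj_iff).mp (by rw [← heq, hkey])
      omega
    have hj0 : (0:Int) ≤ (tot.idxOf c : Int) := Int.natCast_nonneg _
    have hj1 : (tot.idxOf c : Int) < (tot.length : Int) := by exact_mod_cast hlt
    rw [if_pos hc]
    simp only [PySem.List.len_eq]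
    rw [PySem.List.pyRange_one_append 0 (tot.idxOf c : Int) (tot.length : Int) hj0 (by omega),
      PySem.List.pyRange_one_cons hj1, List.foldl_append, List.foldl_cons]
    rw [pv_foldl_skip _ _ _ ans (fun j hj => by
      rw [PySem.List.mem_pyRange_one] at hj
      refine hskip j ?_ (by omega)
      rw [PySem.List.mem_pyRange_one]
      simp only [PySem.List.len_eq]
      omega)]
    rw [if_pos (by
      rw [PySem.List.pyGetD_eq_getElem tot ' ' hj0 hj1]
      simp [hkey])]
    rw [show PySem.List.pyGet? tot
        (if (tot.length : Int) ≤ (tot.idxOf c : Int) + index then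
          PySem.Int.mod ((tot.idxOf c : Int) + index) (tot.length : Int)
        else (tot.idxOf c : Int) + index)
      = some (PySem.List.pyGetD tot
          (PySem.Int.mod ((tot.idxOf c : Int) + index) (tot.length : Int)) ' ')
      from pv_get_shift tot _ (by omega) (hpre hc)]
    exact pv_foldl_skip _ _ _ _ (fun j hj => by
      rw [PySem.List.mem_pyRange_one] at hj
      refine hskip j ?_ (by omega)
      rw [PySem.List.mem_pyRange_one]
      simp only [PySem.List.len_eq]
      omega)
  · rw [if_neg hc]
    exact pv_foldl_skip _ _ _ ans (fun j hj => by
      rw [PySem.List.mem_pyRange_one] at hj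
      simp only [PySem.List.len_eq] at hj
      intro heq
      exact hc (by
        rw [heq]
        exact PySem.List.pyGetD_mem tot ' ' ⟨by omega, by omega⟩))

-- B's walked character equals A's looked-up character, for c in the reduced alphabet
theorem pv_walk_eq_lookup (skip : String) (index : Int) (c : Char) (hc : c ∈ pvTot skip)
    (_hpre : -(((pvTot skip).length : Int)) ≤ (((pvTot skip).idxOf c : Int)) + index) :
    (List.range (PySem.Int.mod index ((pvTot skip).length : Int)).toNat).foldl
        (fun c _ => pvNxt (PySem.Set.ofList skip.toList) 26 c) c
      = PySem.List.pyGetD (pvTot skip)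
          (PySem.Int.mod (((pvTot skip).idxOf c : Int) + index) (((pvTot skip).length : Int))) ' ' := by
  have hlt : (pvTot skip).idxOf c < (pvTot skip).length := List.idxOf_lt_length_of_mem hc
  have hlen : (pvTot skip).length = (pvR skip).length := by rw [pv_tot_eq]; simp
  set n : Int := ((pvTot skip).length : Int) with hn
  have hnpos : (0:Int) < n := by
    have : 0 < (pvTot skip).length := by omega
    omega
  have hkmod : PySem.Int.mod index n = index % n := PySem.Int.mod_eq_emod_of_pos hnpos
  have hmmod : PySem.Int.mod (((pvTot skip).idxOf c : Int) + index) n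
      = (((pvTot skip).idxOf c : Int) + index) % n := PySem.Int.mod_eq_emod_of_pos hnpos
  have hk0 : 0 ≤ index % n := Int.emod_nonneg index (by omega)
  have hm0 : 0 ≤ (((pvTot skip).idxOf c : Int) + index) % n :=
    Int.emod_nonneg _ (by omega)
  have hm1 : (((pvTot skip).idxOf c : Int) + index) % n < n := Int.emod_lt_of_pos _ hnpos
  set j := (pvTot skip).idxOf c with hj
  have hjR : j < (pvR skip).length := by omega
  have hcR : c = pvCOf ((pvR skip)[j]'(by omega)) := by
    have h1 : (pvTot skip)[j]'hlt = c := List.getElem_idxOf hlt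
    rw [List.getElem_of_eq (pv_tot_eq skip) hlt, List.getElem_map] at h1
    exact h1.symm
  rw [hkmod, hmmod]
  -- the walked side
  rw [hcR, pv_iter skip _ j hjR]
  -- the lookup side
  rw [PySem.List.pyGetD_eq_getElem (pvTot skip) ' ' hm0 (by rw [hn] at hm1; exact_mod_cast hm1)]
  rw [List.getElem_of_eq (pv_tot_eq skip), List.getElem_map]
  -- indices agree
  congr 1
  have hidx : (j + (index % n).toNat) % (pvR skip).length
      = ((j : Int) + index % n).toNat % (pvR skip).length := by
    congr 1
    omega
  have hmodeq : ((j : Int) + index % n) % n = ((j : Int) + index) % n := by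
    conv_rhs => rw [Int.add_emod]
    rw [Int.add_emod (j : Int) (index % n) n, Int.emod_emod_of_dvd index dvd_rfl]
  have hfin : ((j : Int) + index % n).toNat % (pvR skip).length
      = (((j : Int) + index) % n).toNat := by
    have hjk0 : (0:Int) ≤ (j : Int) + index % n := by omega
    have hlen' : ((pvR skip).length : Int) = n := by omega
    have hcast : ((((j : Int) + index % n).toNat % (pvR skip).length : Nat) : Int)
        = ((((j : Int) + index) % n).toNat : Int) := by
      rw [Int.natCast_mod, Int.toNat_of_nonneg hjk0, hlen', hmodeq,
        Int.toNat_of_nonneg hm0]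
    exact_mod_cast hcast
  have hIDX := hidx.trans hfin
  have hb1 : (j + (index % n).toNat) % (pvR skip).length < (pvR skip).length :=
    Nat.mod_lt _ (by omega)
  have hb2 : (((j : Int) + index) % n).toNat < (pvR skip).length := by omega
  have h2 : (pvR skip)[(j + (index % n).toNat) % (pvR skip).length]?
      = (pvR skip)[(((j : Int) + index) % n).toNat]? := by rw [hIDX]
  rw [List.getElem?_eq_getElem hb1, List.getElem?_eq_getElem hb2] at h2
  exact Option.some.inj h2

-- A in fold-over-characters form
theorem pv_solution_eq (s : String) (skip : String) (index : Int) :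
    solution s skip index = String.ofList (s.toList.foldl (fun ans c =>
      (PySem.List.pyRange 0 (PySem.List.len (pvTot skip))).foldl (fun acc j =>
        if c = PySem.List.pyGetD (pvTot skip) j ' ' then
          (match PySem.List.pyGet? (pvTot skip)
              (if PySem.List.len (pvTot skip) ≤ j + index then
                PySem.Int.mod (j + index) (PySem.List.len (pvTot skip)) else j + index) with
           | some ch => acc ++ [ch]
           | none => acc)
        else acc) ans) []) := by
  unfold solution
  exact congrArg String.ofList
    (PySem.List.foldl_pyRange_zero_pyGetD s.toList ' '
      (fun ans c =>
        (PySem.List.pyRange 0 (PySem.List.len (pvTot skip))).foldl (fun acc j =>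
          if c = PySem.List.pyGetD (pvTot skip) j ' ' then
            (match PySem.List.pyGet? (pvTot skip)
                (if PySem.List.len (pvTot skip) ≤ j + index then
                  PySem.Int.mod (j + index) (PySem.List.len (pvTot skip)) else j + index) with
             | some ch => acc ++ [ch]
             | none => acc)
          else acc) ans) [])

-- ===== VERDICT (by name: the statement is the Claim_ definition above) =====
theorem solution_spec : Claim_equal_solution := by
  intro s skip index _ hpre
  have hpre' : ∀ c ∈ s.toList, c ∈ pvTot skip →
      -((pvTot skip).length : Int) ≤ ((pvTot skip).idxOf c : Int) + index := by
    rw [Pre_solution, List.all_eq_true] at hpre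
    intro c hc hm
    have h2 := hpre c hc
    rw [Bool.or_eq_true, Bool.not_eq_true', decide_eq_true_eq] at h2
    rcases h2 with h2 | h2
    · exact absurd hm (by simpa using h2)
    · exact h2
  unfold Spec_solution
  rw [pv_solution_eq]
  simp only [solution_alt]
  rw [pv_count_eq]
  by_cases hnil : pvTot skip = []
  · rw [if_pos (by rw [hnil]; rfl)]
    have hzero : PySem.List.pyRange 0 (PySem.List.len (pvTot skip)) 1 = [] := by
      rw [hnil]
      exact PySem.List.pyRange_one_eq_nil (by simp [PySem.List.len_eq])
    have hstep : ∀ (a : List Char) (c : Char),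
        (PySem.List.pyRange 0 (PySem.List.len (pvTot skip))).foldl (fun acc j =>
          if c = PySem.List.pyGetD (pvTot skip) j ' ' then
            (match PySem.List.pyGet? (pvTot skip)
                (if PySem.List.len (pvTot skip) ≤ j + index then
                  PySem.Int.mod (j + index) (PySem.List.len (pvTot skip)) else j + index) with
             | some ch => acc ++ [ch]
             | none => acc)
          else acc) a = a := by
      intro a c
      rw [hzero]
      rfl
    have hall : ∀ (cs : List Char) (a : List Char), cs.foldl (fun ans c =>
        (PySem.List.pyRange 0 (PySem.List.len (pvTot skip))).foldl (fun acc j =>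
          if c = PySem.List.pyGetD (pvTot skip) j ' ' then
            (match PySem.List.pyGet? (pvTot skip)
                (if PySem.List.len (pvTot skip) ≤ j + index then
                  PySem.Int.mod (j + index) (PySem.List.len (pvTot skip)) else j + index) with
             | some ch => acc ++ [ch]
             | none => acc)
          else acc) ans) a = a := by
      intro cs
      induction cs with
      | nil => intro a; rfl
      | cons x xs ih =>
        intro a
        rw [List.foldl_cons, hstep a x]
        exact ih a
    rw [hall s.toList []]
  · have hpos : 0 < (pvTot skip).length := List.length_pos_of_ne_nil hnil
    rw [if_neg (by simpa using (by omega : ¬ ((pvTot skip).length : Int) = 0))]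
    refine congrArg String.ofList ?_
    have key : ∀ (cs : List Char), (∀ c ∈ cs, c ∈ pvTot skip →
        -((pvTot skip).length : Int) ≤ ((pvTot skip).idxOf c : Int) + index) →
        ∀ a, cs.foldl (fun ans c =>
          (PySem.List.pyRange 0 (PySem.List.len (pvTot skip))).foldl (fun acc j =>
            if c = PySem.List.pyGetD (pvTot skip) j ' ' then
              (match PySem.List.pyGet? (pvTot skip)
                  (if PySem.List.len (pvTot skip) ≤ j + index then
                    PySem.Int.mod (j + index) (PySem.List.len (pvTot skip)) else j + index) with
               | some ch => acc ++ [ch]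
               | none => acc)
            else acc) ans) a
        = cs.foldl (fun out c =>
            if 'a' ≤ c ∧ c ≤ 'z' ∧ ((PySem.Set.ofList skip.toList).contains c) = false then
              out ++ [(List.range (PySem.Int.mod index ((pvTot skip).length : Int)).toNat).foldl
                (fun c _ => pvNxt (PySem.Set.ofList skip.toList) 26 c) c]
            else out) a := by
      intro cs
      induction cs with
      | nil => intro _ a; rfl
      | cons c cs ih =>
        intro hp a
        simp only [List.foldl_cons]
        rw [pv_innerA skip index c (hp c (by simp))]
        by_cases hc : c ∈ pvTot skip
        · rw [if_pos hc, if_pos ((pv_guard skip c).mpr hc)]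
          rw [pv_walk_eq_lookup skip index c hc (hp c (by simp) hc)]
          exact ih (fun c' hc' => hp c' (by simp [hc'])) _
        · rw [if_neg hc, if_neg (fun hg => hc ((pv_guard skip c).mp hg))]
          exact ih (fun c' hc' => hp c' (by simp [hc'])) _
    exact key s.toList hpre' []

set_option maxRecDepth 9000 in
theorem solution_raises : Claim_raises_solution := by
  unfold Claim_raises_solution
  constructor
  · intro s skip index _ hr hpre
    rw [Raises_solution, List.any_eq_true] at hr
    obtain ⟨c, hc, hcc⟩ := hr
    rw [Bool.and_eq_true, decide_eq_true_eq] at hcc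
    rw [Pre_solution, List.all_eq_true] at hpre
    have h2 := hpre c hc
    rw [Bool.or_eq_true, Bool.not_eq_true', decide_eq_true_eq] at h2
    rcases h2 with h2 | h2
    · rw [hcc.1] at h2; simp at h2
    · omega
  · exact ⟨by decide, by decide, by decide⟩

-- self-check reading the verdict above: the witness is in the crash region and B's port returns "z" there
theorem solution_raises_ok :
    Raises_solution "a" "" (-27) ∧ solution_alt "a" "" (-27) = pvRaiseWitnessOut_solution :=
  ⟨solution_raises.2.2.1, solution_raises.2.2.2⟩
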